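-- pv_equiv track=rewrite | github.com/Ever-Miller/Chess-Project | algorithms.py | set_file_and_rank
-- ===== SOURCE A (Python) =====
-- def set_file_and_rank(file_num: int, rank_num: int) -> int:
--     mask = 0
--     for rank in range(8):
--         for file in range(8):
--             square = rank * 8 + file
--
--             if file_num != -1:
--                if file == file_num:
--                 # set bit
--                  mask |= (1 << square)
--             elif rank_num != -1:
--                 if rank == rank_num:
--                   # set bit
--                   mask |= (1 << square)
--
--     return mask
-- ===== SOURCE B (Python) =====
-- def set_file_and_rank(file_num: int, rank_num: int) -> int:
--     if file_num != -1:
--         return 0x0101010101010101 << file_num if 0 <= file_num < 8 else 0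
--     if 0 <= rank_num < 8:
--         return 0xFF << (8 * rank_num)
--     return 0
-- ===== Notes on version B (the rewrite author's own statement) =====
-- stated objective: faster
-- what changed: Replaced the 64-iteration nested loop with a closed-form shifted bitmask (file column mask or rank byte mask), keeping A's file-over-rank precedence and its return of 0 for out-of-range indices.
import Mathlib
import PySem

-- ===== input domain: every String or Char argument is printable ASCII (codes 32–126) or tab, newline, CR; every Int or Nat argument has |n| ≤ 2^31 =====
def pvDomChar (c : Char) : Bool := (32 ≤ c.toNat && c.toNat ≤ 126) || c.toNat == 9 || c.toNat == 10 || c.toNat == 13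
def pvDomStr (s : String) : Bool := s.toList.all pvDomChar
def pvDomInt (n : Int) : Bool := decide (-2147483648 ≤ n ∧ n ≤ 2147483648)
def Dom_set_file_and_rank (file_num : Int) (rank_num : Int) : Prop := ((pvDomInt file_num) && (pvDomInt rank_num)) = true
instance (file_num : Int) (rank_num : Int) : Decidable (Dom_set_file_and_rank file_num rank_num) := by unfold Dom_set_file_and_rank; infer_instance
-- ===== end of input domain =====

-- B replaces A's 64-iteration nested loop with a closed-form shifted bitmask (same values, constant-factor change).

-- ===== PORT A =====
-- literal transliteration of A's nested loops; square = rank*8+file is in 0..63 so .toNat is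
-- exact, Int.lor is Python's `|` on these nonnegative ints, `<<<` is Python's `<<`
def set_file_and_rank (file_num : Int) (rank_num : Int) : Int :=
  (PySem.List.pyRange 0 8 1).foldl (fun mask rank =>
    (PySem.List.pyRange 0 8 1).foldl (fun mask file =>
      let square := rank * 8 + file
      if file_num ≠ -1 then
        if file = file_num then Int.lor mask ((1:Int) <<< square.toNat) else mask
      else if rank_num ≠ -1 then
        if rank = rank_num then Int.lor mask ((1:Int) <<< square.toNat) else mask
      else mask) mask) 0

-- ===== PORT B =====
-- shift exponents are nonneg in the taken branches, so .toNat is exact for Python's <<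
def set_file_and_rank_alt (file_num : Int) (rank_num : Int) : Int :=
  if file_num ≠ -1 then
    if 0 ≤ file_num ∧ file_num < 8 then (0x0101010101010101 : Int) <<< file_num.toNat else 0
  else if 0 ≤ rank_num ∧ rank_num < 8 then (0xFF : Int) <<< (8 * rank_num).toNat else 0

-- ===== PRECONDITION & SPEC =====
def Spec_set_file_and_rank (file_num : Int) (rank_num : Int) (out : Int) : Prop := out = set_file_and_rank_alt file_num rank_num
instance (file_num : Int) (rank_num : Int) (out : Int) : Decidable (Spec_set_file_and_rank file_num rank_num out) := by unfold Spec_set_file_and_rank; infer_instance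

-- ===== CLAIM (what is proved, stated in full; the proofs are below) =====
def Claim_equal_set_file_and_rank : Prop := ∀ (file_num : Int) (rank_num : Int), Dom_set_file_and_rank file_num rank_num → Spec_set_file_and_rank file_num rank_num (set_file_and_rank file_num rank_num)

-- ===== LEMMAS AND PROOFS =====

-- When file_num ∈ [0,8), both programs ignore rank_num; reduce to the 8 closed instances.
theorem set_file_and_rank_file_in (file_num rank_num : Int) (h0 : 0 ≤ file_num) (h8 : file_num < 8) :
    set_file_and_rank file_num rank_num = set_file_and_rank_alt file_num rank_num := by
  have hne : file_num ≠ -1 := by omega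
  have h : set_file_and_rank file_num rank_num = set_file_and_rank file_num 0 := by
    simp [set_file_and_rank, PySem.List.pyRange, hne]
  have h' : set_file_and_rank_alt file_num rank_num = set_file_and_rank_alt file_num 0 := by
    simp [set_file_and_rank_alt, hne]
  rw [h, h']
  interval_cases file_num <;> decide

-- When file_num is neither -1 nor in [0,8), A's inner test never fires, so A returns 0.
theorem set_file_and_rank_file_oob (file_num rank_num : Int) (hne : file_num ≠ -1)
    (h0 : (0:Int) ≠ file_num) (h1 : (1:Int) ≠ file_num) (h2 : (2:Int) ≠ file_num)
    (h3 : (3:Int) ≠ file_num) (h4 : (4:Int) ≠ file_num) (h5 : (5:Int) ≠ file_num)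
    (h6 : (6:Int) ≠ file_num) (h7 : (7:Int) ≠ file_num) :
    set_file_and_rank file_num rank_num = 0 := by
  simp [set_file_and_rank, PySem.List.pyRange, List.range_succ, hne, h0, h1, h2, h3, h4, h5, h6, h7]

-- When file_num = -1 and rank_num is neither -1 nor in [0,8), A also returns 0.
theorem set_file_and_rank_rank_oob (rank_num : Int) (hne : rank_num ≠ -1)
    (h0 : (0:Int) ≠ rank_num) (h1 : (1:Int) ≠ rank_num) (h2 : (2:Int) ≠ rank_num)
    (h3 : (3:Int) ≠ rank_num) (h4 : (4:Int) ≠ rank_num) (h5 : (5:Int) ≠ rank_num)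
    (h6 : (6:Int) ≠ rank_num) (h7 : (7:Int) ≠ rank_num) :
    set_file_and_rank (-1) rank_num = 0 := by
  simp [set_file_and_rank, PySem.List.pyRange, List.range_succ, hne, h0, h1, h2, h3, h4, h5, h6, h7]

-- ===== VERDICT (by name: the statement is the Claim_ definition above) =====
theorem set_file_and_rank_spec : Claim_equal_set_file_and_rank := by
  intro file_num rank_num _
  unfold Spec_set_file_and_rank
  by_cases hf : file_num = -1
  · subst hf
    by_cases hr : 0 ≤ rank_num ∧ rank_num < 8
    · obtain ⟨hr0, hr8⟩ := hr
      interval_cases rank_num <;> decide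
    · by_cases hrm : rank_num = -1
      · subst hrm; decide
      · rw [set_file_and_rank_rank_oob rank_num hrm
          (by omega) (by omega) (by omega) (by omega) (by omega) (by omega) (by omega) (by omega)]
        simp [set_file_and_rank_alt, hr]
  · by_cases hin : 0 ≤ file_num ∧ file_num < 8
    · exact set_file_and_rank_file_in file_num rank_num hin.1 hin.2
    · rw [set_file_and_rank_file_oob file_num rank_num hf
        (by omega) (by omega) (by omega) (by omega) (by omega) (by omega) (by omega) (by omega)]
      simp [set_file_and_rank_alt, hf, hin]
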